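-- pv_equiv track=rewrite | github.com/LenisLin/Frontier-Compass | src/frontier_compass/reporting/daily_brief.py | summarize_category_counts
-- ===== SOURCE A (Python) =====
-- from typing import Literal, Sequence
--
-- def summarize_category_counts(
--     searched_categories: Sequence[str],
--     per_category_counts: dict[str, int],
-- ) -> tuple[str, ...]:
--     labels: list[str] = []
--     seen: set[str] = set()
--     for category in searched_categories:
--         if category in seen:
--             continue
--         labels.append(f"{category}: {int(per_category_counts.get(category, 0))}")
--         seen.add(category)
--     for category in sorted(per_category_counts):
--         if category in seen:
--             continue
--         labels.append(f"{category}: {int(per_category_counts.get(category, 0))}")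
--     return tuple(labels)
-- ===== SOURCE B (Python) =====
-- def summarize_category_counts(searched_categories, per_category_counts):
--     # Scheduling by rank: give every category one integer rank (searched: its first
--     # index; new dict keys: positions after all searched), then do a single sort by rank.
--     rank = {}
--     for i, c in enumerate(searched_categories):
--         if c not in rank:
--             rank[c] = i
--     base = len(searched_categories)
--     for j, c in enumerate(sorted(per_category_counts)):
--         if c not in rank:
--             rank[c] = base + j
--     return tuple(f"{c}: {int(per_category_counts.get(c, 0))}"
--                  for c in sorted(rank, key=rank.__getitem__))
-- ===== Notes on version B (the rewrite author's own statement) =====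
-- stated objective: alternative
-- what changed: B assigns every category a single integer rank in one dict (searched: first-occurrence index; remaining dict keys: len(searched)+position in the sorted key list) and produces the output by one sort of the rank map's keys by rank, instead of A's two interleaved append-and-mark formatting loops.
import Mathlib
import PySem

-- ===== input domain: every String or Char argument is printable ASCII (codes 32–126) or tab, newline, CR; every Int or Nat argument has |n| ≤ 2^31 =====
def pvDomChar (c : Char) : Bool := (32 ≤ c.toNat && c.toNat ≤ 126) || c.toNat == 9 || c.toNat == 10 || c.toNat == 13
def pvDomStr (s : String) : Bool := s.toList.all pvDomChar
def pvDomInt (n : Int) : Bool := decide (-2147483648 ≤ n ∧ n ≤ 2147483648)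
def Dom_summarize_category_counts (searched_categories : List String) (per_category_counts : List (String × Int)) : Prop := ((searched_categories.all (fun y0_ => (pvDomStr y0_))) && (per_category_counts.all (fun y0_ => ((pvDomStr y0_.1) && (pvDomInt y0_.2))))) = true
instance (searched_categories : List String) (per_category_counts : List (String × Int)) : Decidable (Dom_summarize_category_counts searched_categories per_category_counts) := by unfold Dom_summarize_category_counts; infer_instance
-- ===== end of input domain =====

-- B replaces A's two interleaved append-and-mark formatting loops by a rank map (searched
-- category ↦ first index; new dict key ↦ len(searched)+sorted position) and ONE sort by rank;
-- objective: alternative (same asymptotic cost, different algorithm).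

-- ===== PORT A =====
def summarize_category_counts (searched_categories : List String) (per_category_counts : List (String × Int)) : List String :=
  let d := PySem.Dict.ofList per_category_counts
  let st := searched_categories.foldl
    (fun (p : List String × PySem.Set String) category =>
      if PySem.Set.contains p.2 category then p
      else (p.1 ++ [category ++ ": " ++ PySem.Int.toStr (d.getD category 0)],
            PySem.Set.add p.2 category))
    ([], PySem.Set.empty)
  (PySem.List.sorted d.keys (fun x => x) false).foldl
    (fun labels category =>
      if PySem.Set.contains st.2 category then labels
      else labels ++ [category ++ ": " ++ PySem.Int.toStr (d.getD category 0)])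
    st.1

-- ===== PORT B =====
def summarize_category_counts_alt (searched_categories : List String) (per_category_counts : List (String × Int)) : List String :=
  let d := PySem.Dict.ofList per_category_counts
  let rank1 := (PySem.List.enumerate searched_categories).foldl
    (fun (r : PySem.Dict String Int) p =>
      if r.contains p.2 then r else r.insert p.2 p.1)
    PySem.Dict.empty
  let base : Int := searched_categories.length
  let rank := (PySem.List.enumerate (PySem.List.sorted d.keys (fun x => x) false)).foldl
    (fun (r : PySem.Dict String Int) p =>
      if r.contains p.2 then r else r.insert p.2 (base + p.1))
    rank1
  -- sorted(rank, key=rank.__getitem__): every element sorted is a key of rank, so the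
  -- lookup always hits; getD's default 0 is never read
  (PySem.List.sorted rank.keys (fun c => rank.getD c 0) false).map
    (fun c => c ++ ": " ++ PySem.Int.toStr (d.getD c 0))

-- ===== PRECONDITION & SPEC =====
def Spec_summarize_category_counts (searched_categories : List String) (per_category_counts : List (String × Int)) (out : List String) : Prop := out = summarize_category_counts_alt searched_categories per_category_counts
instance (searched_categories : List String) (per_category_counts : List (String × Int)) (out : List String) : Decidable (Spec_summarize_category_counts searched_categories per_category_counts out) := by unfold Spec_summarize_category_counts; infer_instance

-- ===== CLAIM (what is proved, stated in full; the proofs are below) =====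
def Claim_equal_summarize_category_counts : Prop := ∀ (searched_categories : List String) (per_category_counts : List (String × Int)), Dom_summarize_category_counts searched_categories per_category_counts → Spec_summarize_category_counts searched_categories per_category_counts (summarize_category_counts searched_categories per_category_counts)

-- ===== LEMMAS AND PROOFS =====

-- the formatting function both programs share (proof-side name only)
def fmtOf (d : PySem.Dict String Int) (c : String) : String :=
  c ++ ": " ++ PySem.Int.toStr (d.getD c 0)

-- the common intermediate form both programs are reduced to
def target (searched_categories : List String) (per_category_counts : List (String × Int)) : List String :=
  let d := PySem.Dict.ofList per_category_counts
  (PySem.List.dedup searched_categories ++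
    PySem.List.sorted (d.keys.filter
      (fun k => !(PySem.Set.contains (PySem.Set.ofList searched_categories) k))) (fun x => x) false).map
    (fmtOf d)

-- ---- A-side machinery ----

-- structural picture of A's first loop: the new (unseen) categories, in first-occurrence order
def dedupSeen : List String → PySem.Set String → List String
  | [], _ => []
  | c :: cs, s =>
    if c ∈ s then dedupSeen cs s
    else c :: dedupSeen cs (PySem.Set.add s c)

theorem loop1_eq (f : String → String) (sc : List String) :
    ∀ (l0 : List String) (s0 : PySem.Set String),
    sc.foldl
      (fun (p : List String × PySem.Set String) c =>
        if PySem.Set.contains p.2 c then p else (p.1 ++ [f c], PySem.Set.add p.2 c))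
      (l0, s0)
    = (l0 ++ (dedupSeen sc s0).map f, PySem.Set.update s0 sc) := by
  induction sc with
  | nil => intro l0 s0; simp [dedupSeen, PySem.Set.update]
  | cons c cs ih =>
    intro l0 s0
    rw [List.foldl_cons]
    by_cases h : PySem.Set.contains s0 c
    · have hm : c ∈ s0 := by simpa using h
      rw [if_pos h, ih]
      simp [dedupSeen, hm, PySem.Set.update_cons]
    · have hm : c ∉ s0 := by simpa using h
      rw [if_neg h, ih]
      simp [dedupSeen, hm, PySem.Set.update_cons]

theorem dedupSeen_eq (sc : List String) :
    ∀ s : PySem.Set String,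
    dedupSeen sc s = (PySem.List.dedup sc).filter (fun c => !(PySem.Set.contains s c)) := by
  induction sc with
  | nil => intro s; rfl
  | cons c cs ih =>
    intro s
    have hded : PySem.List.dedup (c :: cs) = c :: PySem.Set.discard (PySem.List.dedup cs) c := by
      simp [PySem.Set.ofList_cons]
    have hdis : PySem.Set.discard (PySem.List.dedup cs) c
        = (PySem.List.dedup cs).filter (fun y => !(y == c)) := rfl
    rw [hded, hdis]
    by_cases h : c ∈ s
    · rw [show dedupSeen (c :: cs) s = dedupSeen cs s from by simp [dedupSeen, h]]
      rw [ih s]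
      rw [List.filter_cons, if_neg (by simp [h]), List.filter_filter]
      apply List.filter_congr
      intro y _
      by_cases hy : y = c
      · subst hy; simp [h]
      · simp [hy]
    · rw [show dedupSeen (c :: cs) s = c :: dedupSeen cs (PySem.Set.add s c)
            from by simp [dedupSeen, h]]
      rw [ih]
      rw [List.filter_cons, if_pos (by simp [h]), List.filter_filter]
      refine congrArg (c :: ·) ?_
      apply List.filter_congr
      intro y _
      by_cases hy : y = c
      · subst hy; simp [PySem.Set.mem_add]
      · apply Bool.eq_iff_iff.mpr
        simp [PySem.Set.mem_add, hy]

theorem sorted_filter_comm (xs : List String) (p : String → Bool) (h : xs.Nodup) :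
    (PySem.List.sorted xs (fun x => x) false).filter p
    = PySem.List.sorted (xs.filter p) (fun x => x) false := by
  have hperm : ((PySem.List.sorted xs (fun x => x) false).filter p).Perm (xs.filter p) :=
    (PySem.List.sorted_perm xs (fun x => x) false).filter p
  have hnd : (PySem.List.sorted xs (fun x => x) false).Nodup :=
    ((PySem.List.sorted_perm xs (fun x => x) false).nodup_iff).mpr h
  have hle := PySem.List.sorted_pairwise xs (fun x => x)
  have hpw : (PySem.List.sorted xs (fun x => x) false).Pairwise (fun a b => a < b) :=
    (hle.and hnd).imp (fun hab => lt_of_le_of_ne hab.1 hab.2)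
  exact (PySem.List.sorted_eq_of_perm_of_pairwise_lt _ _ (fun x => x) hperm (hpw.filter p)).symm

theorem second_loop_eq (seen : PySem.Set String) (f : String → String)
    (l : List String) (acc : List String) :
    l.foldl (fun labels c => if PySem.Set.contains seen c then labels else labels ++ [f c]) acc
    = acc ++ (l.filter (fun c => !(PySem.Set.contains seen c))).map f := by
  rw [show (fun labels c => if PySem.Set.contains seen c then labels else labels ++ [f c])
        = (fun labels c => if !(PySem.Set.contains seen c) then labels ++ [f c] else labels)
      from by funext labels c; rcases Bool.eq_false_or_eq_true (PySem.Set.contains seen c) with h | h <;> rw [h] <;> rfl]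
  apply PySem.List.foldl_append_if

theorem A_eq_target (sc : List String) (pcc : List (String × Int)) :
    summarize_category_counts sc pcc = target sc pcc := by
  show (PySem.List.sorted (PySem.Dict.ofList pcc).keys (fun x => x) false).foldl
      (fun labels category =>
        if PySem.Set.contains
            (sc.foldl
              (fun (p : List String × PySem.Set String) category =>
                if PySem.Set.contains p.2 category then p
                else (p.1 ++ [fmtOf (PySem.Dict.ofList pcc) category], PySem.Set.add p.2 category))
              ([], PySem.Set.empty)).2 category then labels
        else labels ++ [fmtOf (PySem.Dict.ofList pcc) category])
      (sc.foldl
        (fun (p : List String × PySem.Set String) category =>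
          if PySem.Set.contains p.2 category then p
          else (p.1 ++ [fmtOf (PySem.Dict.ofList pcc) category], PySem.Set.add p.2 category))
        ([], PySem.Set.empty)).1
    = (PySem.List.dedup sc ++
        PySem.List.sorted ((PySem.Dict.ofList pcc).keys.filter
          (fun k => !(PySem.Set.contains (PySem.Set.ofList sc) k))) (fun x => x) false).map
        (fmtOf (PySem.Dict.ofList pcc))
  rw [loop1_eq (fmtOf (PySem.Dict.ofList pcc)) sc [] PySem.Set.empty]
  rw [show PySem.Set.update PySem.Set.empty sc = PySem.Set.ofList sc
      from PySem.Set.update_nil_left sc]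
  show (PySem.List.sorted (PySem.Dict.ofList pcc).keys (fun x => x) false).foldl
      (fun labels category =>
        if PySem.Set.contains (PySem.Set.ofList sc) category then labels
        else labels ++ [fmtOf (PySem.Dict.ofList pcc) category])
      ([] ++ (dedupSeen sc PySem.Set.empty).map (fmtOf (PySem.Dict.ofList pcc))) = _
  rw [second_loop_eq, sorted_filter_comm _ _ (PySem.Dict.nodup_keys_ofList pcc),
      dedupSeen_eq, List.map_append, List.nil_append]
  simp

-- ---- B-side machinery ----

-- invariant of the rank-building loops: values strictly increase in insertion order and stay below b
def RInv (r : PySem.Dict String Int) (b : Int) : Prop :=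
  r.items.Pairwise (fun p q => p.2 < q.2) ∧ ∀ p ∈ r.items, p.2 < b

theorem keys_rank (g : Int → Int) (xs : List String) :
    ∀ (n : Int) (r : PySem.Dict String Int),
    ((PySem.List.enumerate xs n).foldl
      (fun (r : PySem.Dict String Int) p =>
        if r.contains p.2 then r else r.insert p.2 (g p.1)) r).keys
    = PySem.Set.update r.keys xs := by
  induction xs with
  | nil => intro n r; simp [PySem.List.enumerate, PySem.Set.update]
  | cons x t ih =>
    intro n r
    rw [show PySem.List.enumerate (x :: t) n = (n, x) :: PySem.List.enumerate t (n + 1) from rfl]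
    rw [List.foldl_cons, PySem.Set.update_cons]
    by_cases hc : r.contains x = true
    · have hm : x ∈ r.keys := (PySem.Dict.contains_iff_mem_keys r x).mp hc
      rw [if_pos hc, ih]
      simp [PySem.Set.add, hm]
    · have hc' : r.contains x = false := by simpa using hc
      have hm : x ∉ r.keys := fun h => hc ((PySem.Dict.contains_iff_mem_keys r x).mpr h)
      rw [if_neg (by simp [hc']), ih]
      rw [PySem.Dict.keys_insert_of_not_contains r (g n) hc']
      simp [PySem.Set.add, hm]

theorem inv_rank (g : Int → Int) (hg : ∀ m : Int, g m < g (m + 1)) (xs : List String) :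
    ∀ (n : Int) (r : PySem.Dict String Int), RInv r (g n) →
    RInv ((PySem.List.enumerate xs n).foldl
      (fun (r : PySem.Dict String Int) p =>
        if r.contains p.2 then r else r.insert p.2 (g p.1)) r) (g (n + xs.length)) := by
  induction xs with
  | nil => intro n r h; simpa [PySem.List.enumerate] using h
  | cons x t ih =>
    intro n r h
    rw [show PySem.List.enumerate (x :: t) n = (n, x) :: PySem.List.enumerate t (n + 1) from rfl]
    rw [List.foldl_cons]
    have harg : n + ((x :: t).length : Int) = (n + 1) + (t.length : Int) := by
      simp only [List.length_cons]; push_cast; ring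
    rw [harg]
    apply ih
    by_cases hc : r.contains x = true
    · rw [if_pos hc]
      exact ⟨h.1, fun p hp => lt_trans (h.2 p hp) (hg n)⟩
    · have hc' : r.contains x = false := by simpa using hc
      rw [if_neg (by simp [hc'])]
      rw [RInv, PySem.Dict.items_insert_of_not_contains r (g n) hc']
      constructor
      · rw [List.pairwise_append]
        exact ⟨h.1, List.pairwise_singleton _ _,
          fun p hp q hq => by rw [List.mem_singleton] at hq; rw [hq]; exact h.2 p hp⟩
      · intro p hp
        rcases List.mem_append.mp hp with hp | hp
        · exact lt_trans (h.2 p hp) (hg n)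
        · rw [List.mem_singleton] at hp; rw [hp]; exact hg n

theorem update_eq_append_dedupSeen (xs : List String) :
    ∀ s : PySem.Set String, PySem.Set.update s xs = s ++ dedupSeen xs s := by
  induction xs with
  | nil => intro s; simp [PySem.Set.update, dedupSeen]
  | cons x t ih =>
    intro s
    rw [PySem.Set.update_cons]
    by_cases h : x ∈ s
    · have : PySem.Set.add s x = s := by simp [PySem.Set.add, h]
      rw [this, ih, show dedupSeen (x :: t) s = dedupSeen t s from by simp [dedupSeen, h]]
    · have hadd : PySem.Set.add s x = s ++ [x] := by simp [PySem.Set.add, h]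
      rw [ih, hadd, show dedupSeen (x :: t) s = x :: dedupSeen t (PySem.Set.add s x)
            from by simp [dedupSeen, h], hadd]
      simp

theorem dedup_of_nodup (xs : List String) (h : xs.Nodup) : PySem.List.dedup xs = xs := by
  induction xs with
  | nil => rfl
  | cons x t ih =>
    have hx : x ∉ t := (List.nodup_cons.mp h).1
    have ht := ih (List.nodup_cons.mp h).2
    rw [show PySem.List.dedup (x :: t) = x :: PySem.Set.discard (PySem.List.dedup t) x from by
          simp [PySem.Set.ofList_cons]]
    rw [show PySem.Set.discard (PySem.List.dedup t) x
          = (PySem.List.dedup t).filter (fun y => !(y == x)) from rfl, ht]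
    rw [List.filter_eq_self.mpr (fun y hy => by simp; rintro rfl; exact hx hy)]

theorem B_eq_target (sc : List String) (pcc : List (String × Int)) :
    summarize_category_counts_alt sc pcc = target sc pcc := by
  show (PySem.List.sorted
        ((PySem.List.enumerate (PySem.List.sorted (PySem.Dict.ofList pcc).keys (fun x => x) false)).foldl
          (fun (r : PySem.Dict String Int) p =>
            if r.contains p.2 then r else r.insert p.2 ((sc.length : Int) + p.1))
          ((PySem.List.enumerate sc).foldl
            (fun (r : PySem.Dict String Int) p =>
              if r.contains p.2 then r else r.insert p.2 p.1) PySem.Dict.empty)).keys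
        (fun c => ((PySem.List.enumerate (PySem.List.sorted (PySem.Dict.ofList pcc).keys (fun x => x) false)).foldl
          (fun (r : PySem.Dict String Int) p =>
            if r.contains p.2 then r else r.insert p.2 ((sc.length : Int) + p.1))
          ((PySem.List.enumerate sc).foldl
            (fun (r : PySem.Dict String Int) p =>
              if r.contains p.2 then r else r.insert p.2 p.1) PySem.Dict.empty)).getD c 0) false).map
      (fun c => c ++ ": " ++ PySem.Int.toStr ((PySem.Dict.ofList pcc).getD c 0))
    = target sc pcc
  set d := PySem.Dict.ofList pcc with hd
  set S := PySem.List.sorted d.keys (fun x => x) false with hS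
  set rank1 := (PySem.List.enumerate sc).foldl
      (fun (r : PySem.Dict String Int) p =>
        if r.contains p.2 then r else r.insert p.2 p.1) PySem.Dict.empty with hrank1
  set rank := (PySem.List.enumerate S).foldl
      (fun (r : PySem.Dict String Int) p =>
        if r.contains p.2 then r else r.insert p.2 ((sc.length : Int) + p.1)) rank1 with hrank
  have hSnd : S.Nodup :=
    ((PySem.List.sorted_perm d.keys (fun x => x) false).nodup_iff).mpr
      (PySem.Dict.nodup_keys_ofList pcc)
  -- keys of rank1 and rank
  have hk1 : rank1.keys = PySem.Set.ofList sc := by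
    have h := keys_rank (fun i => i) sc 0 PySem.Dict.empty
    simp only [] at h
    rw [hrank1, h]
    exact PySem.Set.update_nil_left sc
  have hkeys : rank.keys
      = PySem.List.dedup sc ++ S.filter (fun k => !(PySem.Set.contains (PySem.Set.ofList sc) k)) := by
    have h := keys_rank (fun i => (sc.length : Int) + i) S 0 rank1
    simp only [] at h
    rw [hrank, h, hk1,
        update_eq_append_dedupSeen S (PySem.Set.ofList sc),
        dedupSeen_eq S (PySem.Set.ofList sc), dedup_of_nodup S hSnd]
    rfl
  -- keys are distinct
  have hknd : rank.keys.Nodup := by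
    rw [hkeys]
    refine List.Nodup.append (PySem.Set.nodup_ofList sc) (hSnd.filter _) ?_
    intro a ha hb
    have := List.of_mem_filter hb
    simp only [Bool.not_eq_true', PySem.Set.contains] at this
    rw [show PySem.List.dedup sc = PySem.Set.ofList sc from rfl] at ha
    simp at this
    simp only [PySem.Set.mem_ofList] at ha
    exact this ha
  -- values strictly increase with insertion order
  have hinv1 : RInv rank1 (0 + (sc.length : Int)) := by
    have h := inv_rank (fun i => i) (fun m => by simp only []; omega) sc 0 PySem.Dict.empty
      ⟨List.Pairwise.nil, by intro p hp; simp [PySem.Dict.empty] at hp⟩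
    simp only [] at h
    rw [hrank1]
    exact h
  have hinv : RInv rank ((sc.length : Int) + (0 + (S.length : Int))) := by
    have h := inv_rank (fun i => (sc.length : Int) + i) (fun m => by simp only []; omega) S 0 rank1
      (by simpa using hinv1)
    simp only [] at h
    rw [hrank]
    exact h
  -- hence the sort key is strictly increasing along rank.keys
  have hpair : rank.keys.Pairwise (fun a b => rank.getD a 0 < rank.getD b 0) := by
    have hitems := hinv.1
    rw [PySem.Dict.items_eq_map_keys rank hknd 0, List.pairwise_map] at hitems
    exact hitems
  have hsorted : PySem.List.sorted rank.keys (fun c => rank.getD c 0) false = rank.keys :=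
    PySem.List.sorted_eq_of_perm_of_pairwise_lt rank.keys rank.keys
      (fun c => rank.getD c 0) (List.Perm.refl _) hpair
  rw [hsorted, hkeys]
  rw [show target sc pcc
      = (PySem.List.dedup sc ++
          PySem.List.sorted (d.keys.filter
            (fun k => !(PySem.Set.contains (PySem.Set.ofList sc) k))) (fun x => x) false).map
          (fmtOf d) from rfl]
  rw [hS, sorted_filter_comm d.keys _ (PySem.Dict.nodup_keys_ofList pcc)]
  rfl

-- ===== VERDICT (by name: the statement is the Claim_ definition above) =====
theorem summarize_category_counts_spec : Claim_equal_summarize_category_counts := by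
  intro sc pcc _
  show summarize_category_counts sc pcc = summarize_category_counts_alt sc pcc
  rw [A_eq_target, B_eq_target]
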